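-- pv_equiv track=rewrite | github.com/leoli-autodesk/multi-ai-chat-poc | src/dedupe.py | has_shared_key_phrases
-- ===== SOURCE A (Python) =====
-- def has_shared_key_phrases(para1: str, para2: str, min_len: int = 12, min_count: int = 3) -> bool:
--     """检查是否有共享关键短语"""
--     # 提取长度>=min_len的子串
--     def extract_substrings(text: str, min_length: int) -> set:
--         substrings = set()
--         for i in range(len(text) - min_length + 1):
--             substrings.add(text[i:i + min_length])
--         return substrings
--
--     substrings1 = extract_substrings(para1, min_len)
--     substrings2 = extract_substrings(para2, min_len)
--
--     shared_count = len(substrings1.intersection(substrings2))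
--     return shared_count >= min_count
-- ===== SOURCE B (Python) =====
-- def has_shared_key_phrases(para1: str, para2: str, min_len: int = 12, min_count: int = 3) -> bool:
--     """Sort-and-merge re-implementation: sort each text's distinct windows and
--     count the common ones with a two-pointer merge (no hashing, no intersection)."""
--     ws1 = sorted({para1[i:i + min_len] for i in range(len(para1) - min_len + 1)})
--     ws2 = sorted({para2[i:i + min_len] for i in range(len(para2) - min_len + 1)})
--     count = 0
--     i = j = 0
--     while i < len(ws1) and j < len(ws2):
--         if ws1[i] == ws2[j]:
--             count += 1
--             i += 1
--             j += 1
--         elif ws1[i] < ws2[j]: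
--             i += 1
--         else:
--             j += 1
--     return count >= min_count
-- ===== Notes on version B (the rewrite author's own statement) =====
-- stated objective: alternative
-- what changed: Instead of hashing both windows sets and taking a set intersection, B sorts each text's distinct length-min_len windows and counts the common ones with a two-pointer merge over the two sorted lists, comparing the merge count with min_count.
import Mathlib
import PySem

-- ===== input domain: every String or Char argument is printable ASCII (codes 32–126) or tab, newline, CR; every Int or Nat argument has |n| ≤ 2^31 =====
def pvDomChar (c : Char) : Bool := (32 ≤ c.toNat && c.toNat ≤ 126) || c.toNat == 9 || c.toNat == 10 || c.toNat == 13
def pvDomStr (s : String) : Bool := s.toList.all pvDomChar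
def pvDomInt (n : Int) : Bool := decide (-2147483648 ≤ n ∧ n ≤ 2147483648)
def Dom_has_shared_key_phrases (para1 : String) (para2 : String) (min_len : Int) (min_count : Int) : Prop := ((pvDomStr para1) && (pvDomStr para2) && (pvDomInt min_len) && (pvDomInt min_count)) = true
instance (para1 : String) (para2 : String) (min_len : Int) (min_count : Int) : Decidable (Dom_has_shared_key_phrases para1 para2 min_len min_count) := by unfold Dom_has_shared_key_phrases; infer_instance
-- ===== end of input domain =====

-- B replaces A's hash-set intersection by sorting each text's distinct windows and
-- counting common windows with a two-pointer merge over the two sorted lists.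

-- ===== PORT A =====
-- extract_substrings: the set-building loop of A
def pvExtract (text : String) (min_length : Int) : PySem.Set String :=
  (PySem.List.pyRange 0 (PySem.Str.len text - min_length + 1) 1).foldl
    (fun s i => PySem.Set.add s (PySem.Str.slice text (some i) (some (i + min_length))))
    PySem.Set.empty

def has_shared_key_phrases (para1 : String) (para2 : String) (min_len : Int) (min_count : Int) : Bool :=
  decide (min_count ≤ PySem.Set.len
    (PySem.Set.inter (pvExtract para1 min_len) (pvExtract para2 min_len)))

-- ===== PORT B =====
-- sorted({text[i:i+min_len] for i in range(len(text)-min_len+1)})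
def pvSortedWindows (text : String) (min_len : Int) : List String :=
  PySem.List.sorted
    (PySem.Set.ofList ((PySem.List.pyRange 0 (PySem.Str.len text - min_len + 1) 1).map
      (fun i => PySem.Str.slice text (some i) (some (i + min_len)))))
    (fun x => x) false

-- the two-pointer while-loop: advance in the list whose current element is smaller,
-- count when both current elements are equal
def pvMerge : List String → List String → Int → Int
  | x :: xs, y :: ys, c =>
    if x == y then pvMerge xs ys (c + 1)
    else if x < y then pvMerge xs (y :: ys) c
    else pvMerge (x :: xs) ys c
  | _, _, c => c
termination_by l1 l2 _ => l1.length + l2.length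

def has_shared_key_phrases_alt (para1 : String) (para2 : String) (min_len : Int) (min_count : Int) : Bool :=
  decide (min_count ≤ pvMerge (pvSortedWindows para1 min_len) (pvSortedWindows para2 min_len) 0)

-- ===== PRECONDITION & SPEC =====
def Spec_has_shared_key_phrases (para1 : String) (para2 : String) (min_len : Int) (min_count : Int) (out : Bool) : Prop := out = has_shared_key_phrases_alt para1 para2 min_len min_count
instance (para1 : String) (para2 : String) (min_len : Int) (min_count : Int) (out : Bool) : Decidable (Spec_has_shared_key_phrases para1 para2 min_len min_count out) := by unfold Spec_has_shared_key_phrases; infer_instance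

-- ===== CLAIM (what is proved, stated in full; the proofs are below) =====
def Claim_equal_has_shared_key_phrases : Prop := ∀ (para1 : String) (para2 : String) (min_len : Int) (min_count : Int), Dom_has_shared_key_phrases para1 para2 min_len min_count → Spec_has_shared_key_phrases para1 para2 min_len min_count (has_shared_key_phrases para1 para2 min_len min_count)

-- ===== LEMMAS AND PROOFS =====

-- the merge count of two strictly increasing lists is the number of elements of the
-- first that occur in the second
theorem pvMerge_eq_filter_length (l1 l2 : List String) (c : Int)
    (h1 : l1.Pairwise (· < ·)) (h2 : l2.Pairwise (· < ·)) :
    pvMerge l1 l2 c = c + ((l1.filter (fun x => decide (x ∈ l2))).length : Int) := by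
  fun_induction pvMerge l1 l2 c with
  | case1 x xs y ys c heq ih =>
    have hxy : x = y := by simpa using heq
    subst hxy
    rw [List.pairwise_cons] at h1 h2
    have hstep : xs.filter (fun a => decide (a ∈ x :: ys)) = xs.filter (fun a => decide (a ∈ ys)) := by
      apply List.filter_congr
      intro a ha
      have hne : a ≠ x := ne_of_gt (h1.1 a ha)
      simp [List.mem_cons, hne]
    rw [ih h1.2 h2.2, List.filter_cons, hstep]
    simp
    omega
  | case2 x xs y ys c heq hlt ih =>
    rw [List.pairwise_cons] at h1
    have hnm : x ∉ y :: ys := by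
      rw [List.pairwise_cons] at h2
      intro hm
      rcases List.mem_cons.mp hm with rfl | hm'
      · exact absurd hlt (lt_irrefl x)
      · exact absurd (lt_trans hlt (h2.1 x hm')) (lt_irrefl x)
    rw [ih h1.2 h2]
    simp only [List.filter_cons, List.mem_cons]
    simp only [List.mem_cons] at hnm
    rw [not_or] at hnm
    simp [hnm.1, hnm.2]
  | case3 x xs y ys c heq hnlt ih =>
    have hyx : y < x := by
      rcases lt_trichotomy x y with h | h | h
      · exact absurd h hnlt
      · exact absurd (by simpa using h : (x == y) = true) (by simpa using heq)
      · exact h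
    rw [List.pairwise_cons] at h2
    have hstep : (x :: xs).filter (fun a => decide (a ∈ y :: ys)) =
        (x :: xs).filter (fun a => decide (a ∈ ys)) := by
      apply List.filter_congr
      intro a ha
      rw [List.pairwise_cons] at h1
      have hya : y < a := by
        rcases List.mem_cons.mp ha with rfl | ha'
        · exact hyx
        · exact lt_trans hyx (h1.1 a ha')
      have hne : a ≠ y := ne_of_gt hya
      simp [List.mem_cons, hne]
    rw [ih h1 h2.2]
    rw [hstep]
  | case4 l1 l2 c h =>
    cases l1 with
    | nil => simp
    | cons x xs =>
      cases l2 with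
      | nil => simp
      | cons y ys => exact (h x xs y ys rfl rfl).elim

theorem pvExtract_eq_ofList (text : String) (min_length : Int) :
    pvExtract text min_length =
      PySem.Set.ofList ((PySem.List.pyRange 0 (PySem.Str.len text - min_length + 1) 1).map
        (fun i => PySem.Str.slice text (some i) (some (i + min_length)))) := by
  simp [pvExtract, PySem.Set.ofList_eq_foldl, List.foldl_map, PySem.Set.empty]

-- the length of the sorted-merge count equals the length of A's intersection list
theorem pvMerge_len_eq_inter (para1 para2 : String) (min_len : Int) :
    pvMerge (pvSortedWindows para1 min_len) (pvSortedWindows para2 min_len) 0 =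
      PySem.Set.len (PySem.Set.inter (pvExtract para1 min_len) (pvExtract para2 min_len)) := by
  set W1 := (PySem.List.pyRange 0 (PySem.Str.len para1 - min_len + 1) 1).map
      (fun i => PySem.Str.slice para1 (some i) (some (i + min_len))) with hW1
  set W2 := (PySem.List.pyRange 0 (PySem.Str.len para2 - min_len + 1) 1).map
      (fun i => PySem.Str.slice para2 (some i) (some (i + min_len))) with hW2
  have hs1 : pvSortedWindows para1 min_len =
      PySem.List.sorted (PySem.Set.ofList W1) (fun x => x) false := rfl
  have hs2 : pvSortedWindows para2 min_len =
      PySem.List.sorted (PySem.Set.ofList W2) (fun x => x) false := rfl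
  rw [pvMerge_eq_filter_length _ _ 0
      (by rw [hs1]; exact PySem.List.sorted_ofList_pairwise_lt W1)
      (by rw [hs2]; exact PySem.List.sorted_ofList_pairwise_lt W2)]
  rw [pvExtract_eq_ofList, pvExtract_eq_ofList, ← hW1, ← hW2]
  -- replace membership in the sorted list by membership in the set
  have hcongr : (pvSortedWindows para1 min_len).filter
        (fun x => decide (x ∈ pvSortedWindows para2 min_len)) =
      (pvSortedWindows para1 min_len).filter
        (fun x => (PySem.Set.ofList W2).contains x) := by
    apply List.filter_congr
    intro a _
    rw [hs2]
    simp [PySem.List.mem_sorted, PySem.Set.contains]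
  rw [hcongr]
  have hperm : (pvSortedWindows para1 min_len).Perm (PySem.Set.ofList W1) := by
    rw [hs1]; exact PySem.List.sorted_perm _ _ _
  have := (hperm.filter (fun x => (PySem.Set.ofList W2).contains x)).length_eq
  simp only [PySem.Set.len, PySem.Set.inter]
  omega

-- ===== VERDICT (by name: the statement is the Claim_ definition above) =====
theorem has_shared_key_phrases_spec : Claim_equal_has_shared_key_phrases := by
  intro para1 para2 min_len min_count _
  unfold Spec_has_shared_key_phrases has_shared_key_phrases has_shared_key_phrases_alt
  rw [pvMerge_len_eq_inter]
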